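-- pv_equiv track=rewrite | github.com/iDorgham/Ai-Workspace-Factory-AIWF | factory/library/01-software-engineering/developing/scripts/run-smoke-tests.py | _extract_command_and_flags
-- ===== SOURCE A (Python) =====
-- def _extract_command_and_flags(tokens):
--     """Extract command and flags from tokens."""
--     command_tokens = []
--     flag_tokens = []
--     parsing_command = True
--
--     for token in tokens:
--         if token.startswith("--"):
--             parsing_command = False
--             flag_tokens.append(token)
--         elif parsing_command:
--             command_tokens.append(token)
--         else:
--             flag_tokens.append(token)
--
--     return " ".join(command_tokens), flag_tokens
-- ===== SOURCE B (Python) =====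
-- def _extract_command_and_flags(tokens):
--     """Extract command and flags from tokens."""
--     idx = next((i for i, t in enumerate(tokens) if t.startswith("--")), len(tokens))
--     return " ".join(tokens[:idx]), list(tokens[idx:])
-- ===== Notes on version B (the rewrite author's own statement) =====
-- stated objective: simpler
-- what changed: Replaces the per-token parsing_command state machine with finding the pivot (first token starting with '--') and returning two slices of the list.
import Mathlib
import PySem

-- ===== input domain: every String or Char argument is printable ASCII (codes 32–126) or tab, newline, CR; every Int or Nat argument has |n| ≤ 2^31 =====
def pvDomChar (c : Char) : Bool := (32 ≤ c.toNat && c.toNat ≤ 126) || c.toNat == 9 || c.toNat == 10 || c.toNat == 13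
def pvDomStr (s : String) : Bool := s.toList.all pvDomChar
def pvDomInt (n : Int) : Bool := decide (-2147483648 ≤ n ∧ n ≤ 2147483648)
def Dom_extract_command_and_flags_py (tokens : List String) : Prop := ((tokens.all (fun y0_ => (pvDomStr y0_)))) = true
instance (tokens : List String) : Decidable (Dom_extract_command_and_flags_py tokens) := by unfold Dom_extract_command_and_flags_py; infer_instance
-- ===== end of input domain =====

-- B replaces A's per-token parsing_command state machine by a pivot split (simpler decomposition; same cost).

-- ===== PORT A =====
-- step of A's for-loop over (command_tokens, flag_tokens, parsing_command)
def pvAStep (st : List String × List String × Bool) (token : String) :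
    List String × List String × Bool :=
  if PySem.Str.startswith token "--" then (st.1, st.2.1 ++ [token], false)
  else if st.2.2 then (st.1 ++ [token], st.2.1, st.2.2)
  else (st.1, st.2.1 ++ [token], st.2.2)

def extract_command_and_flags_py (tokens : List String) : String × List String :=
  let st := tokens.foldl pvAStep ([], [], true)
  (PySem.Str.join " " st.1, st.2.1)

-- ===== PORT B =====
def extract_command_and_flags_py_alt (tokens : List String) : String × List String :=
  let isFlag := fun (t : String) => PySem.Str.startswith t "--"
  (PySem.Str.join " " (tokens.takeWhile (fun t => !(isFlag t))),
   tokens.dropWhile (fun t => !(isFlag t)))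

-- ===== PRECONDITION & SPEC =====
def Spec_extract_command_and_flags_py (tokens : List String) (out : String × List String) : Prop := out = extract_command_and_flags_py_alt tokens
instance (tokens : List String) (out : String × List String) : Decidable (Spec_extract_command_and_flags_py tokens out) := by unfold Spec_extract_command_and_flags_py; infer_instance

-- ===== CLAIM (what is proved, stated in full; the proofs are below) =====
def Claim_equal_extract_command_and_flags_py : Prop := ∀ (tokens : List String), Dom_extract_command_and_flags_py tokens → Spec_extract_command_and_flags_py tokens (extract_command_and_flags_py tokens)

-- ===== LEMMAS AND PROOFS =====
theorem pvA_foldl_false (tokens : List String) (cmd fl : List String) :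
    tokens.foldl pvAStep (cmd, fl, false) = (cmd, fl ++ tokens, false) := by
  induction tokens generalizing fl with
  | nil => simp
  | cons t ts ih =>
      have hstep : pvAStep (cmd, fl, false) t = (cmd, fl ++ [t], false) := by
        simp [pvAStep]
      rw [List.foldl_cons, hstep, ih]
      simp

theorem pvA_foldl_true (tokens : List String) (cmd fl : List String) :
    tokens.foldl pvAStep (cmd, fl, true) =
      (cmd ++ tokens.takeWhile (fun t => !(PySem.Str.startswith t "--")),
       fl ++ tokens.dropWhile (fun t => !(PySem.Str.startswith t "--")),
       tokens.all (fun t => !(PySem.Str.startswith t "--"))) := by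
  induction tokens generalizing cmd fl with
  | nil => simp
  | cons t ts ih =>
      simp only [List.foldl_cons, pvAStep]
      by_cases h : PySem.Chars.startswith t.toList ['-', '-'] = true
      · simp [h, pvA_foldl_false]
      · simp only [Bool.not_eq_true] at h
        simp [h, ih]

-- ===== VERDICT (by name: the statement is the Claim_ definition above) =====
theorem extract_command_and_flags_py_spec : Claim_equal_extract_command_and_flags_py := by
  intro tokens _
  unfold Spec_extract_command_and_flags_py extract_command_and_flags_py extract_command_and_flags_py_alt
  simp [pvA_foldl_true]
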